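-- pv_equiv track=rewrite | github.com/Levakov023/Python | 1/utils.py | unique_count
-- ===== SOURCE A (Python) =====
-- def unique_count(data : dict, chapters: list, word : str) -> int:
--     """
--     Returns the number of unique chapters in which a given word occurs in a dictionary of tariff descriptions.
--
--     Arguments:
--         - data: a dictionary of tariff descriptions, where each key represents a tariff code and each value is a list of words
--         - chapters: a list of chapter codes (two-digit strings) to consider for the count
--         - word: a string representing the word to search for in the descriptions
--
--     Returns:
--          An integer representing the number of unique chapters in which the given word appears at least once.
--     """
--     chaps_words = {i : 0 for i in chapters}
--     for chapter in chapters: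
--         for key, value in data.items():
--             if key.startswith(chapter):
--                 if word in value:
--                     chaps_words[chapter] += 1
--     return sum(1 for i in chaps_words.values() if i > 0)
-- ===== SOURCE B (Python) =====
-- def unique_count(data: dict, chapters: list, word: str) -> int:
--     # One pass over data to collect the keys whose description contains the word,
--     # then count the distinct chapters that prefix at least one such key.
--     hits = [key for key, words in data.items() if word in words]
--     return sum(1 for c in set(chapters) if any(k.startswith(c) for k in hits))
-- ===== Notes on version B (the rewrite author's own statement) =====
-- stated objective: faster
-- what changed: Replaces A's nested chapters-by-data scan with counter dict by a single pass over data collecting keys whose word list contains the word, then one scan over the distinct chapters testing for a matching prefix.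
import Mathlib
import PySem

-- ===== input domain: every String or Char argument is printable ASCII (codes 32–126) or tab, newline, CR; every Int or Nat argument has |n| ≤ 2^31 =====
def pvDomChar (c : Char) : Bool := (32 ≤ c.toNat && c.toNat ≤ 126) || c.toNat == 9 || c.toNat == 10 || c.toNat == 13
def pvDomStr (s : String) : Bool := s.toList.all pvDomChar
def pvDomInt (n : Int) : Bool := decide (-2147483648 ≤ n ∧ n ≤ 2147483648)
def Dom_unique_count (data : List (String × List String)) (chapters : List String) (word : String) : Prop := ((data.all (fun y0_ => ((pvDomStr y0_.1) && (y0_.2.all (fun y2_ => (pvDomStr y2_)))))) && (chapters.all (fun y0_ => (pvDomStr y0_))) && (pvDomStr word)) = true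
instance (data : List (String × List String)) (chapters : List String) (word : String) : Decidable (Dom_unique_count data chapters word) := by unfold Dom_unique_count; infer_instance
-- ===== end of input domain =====

-- B replaces A's chapters×data double scan with one pass over data collecting the matching
-- keys followed by one scan of the distinct chapters (objective: faster, asymptotically).

-- ===== PORT A =====
def unique_count (data : List (String × List String)) (chapters : List String) (word : String) : Int :=
  -- chaps_words = {i : 0 for i in chapters}
  let chaps_words : PySem.Dict String Int :=
    chapters.foldl (fun d i => d.insert i 0) PySem.Dict.empty
  -- for chapter in chapters: for key, value in data.items(): …
  let chaps_words :=
    chapters.foldl (fun d chapter =>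
      data.foldl (fun d kv =>
        if PySem.Str.startswith kv.1 chapter then
          if kv.2.contains word then d.modify chapter 0 (· + 1) else d
        else d) d) chaps_words
  -- sum(1 for i in chaps_words.values() if i > 0)
  chaps_words.values.foldl (fun acc i => if i > 0 then acc + 1 else acc) 0

-- ===== PORT B =====
def unique_count_alt (data : List (String × List String)) (chapters : List String) (word : String) : Int :=
  -- hits = [key for key, words in data.items() if word in words]
  let hits := (data.filter (fun kv => kv.2.contains word)).map (·.1)
  -- sum(1 for c in set(chapters) if any(k.startswith(c) for k in hits))
  (((PySem.Set.ofList chapters).filter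
      (fun c => hits.any (fun k => PySem.Str.startswith k c))).length : Int)

-- ===== PRECONDITION & SPEC =====
def Spec_unique_count (data : List (String × List String)) (chapters : List String) (word : String) (out : Int) : Prop := out = unique_count_alt data chapters word
instance (data : List (String × List String)) (chapters : List String) (word : String) (out : Int) : Decidable (Spec_unique_count data chapters word out) := by unfold Spec_unique_count; infer_instance

-- ===== CLAIM (what is proved, stated in full; the proofs are below) =====
def Claim_equal_unique_count : Prop := ∀ (data : List (String × List String)) (chapters : List String) (word : String), Dom_unique_count data chapters word → Spec_unique_count data chapters word (unique_count data chapters word)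

-- ===== LEMMAS AND PROOFS =====

-- abbreviation used only in the proofs: the inner data-loop step of A
def pvInner (data : List (String × List String)) (word chapter : String)
    (d : PySem.Dict String Int) : PySem.Dict String Int :=
  data.foldl (fun d kv =>
    if PySem.Str.startswith kv.1 chapter then
      if kv.2.contains word then d.modify chapter 0 (· + 1) else d
    else d) d

-- m c = number of data entries whose key starts with c and whose words contain the word
def pvM (data : List (String × List String)) (word c : String) : Int :=
  ((data.filter (fun kv => PySem.Str.startswith kv.1 c && kv.2.contains word)).length : Int)

theorem pvM_cons (kv : String × List String) (l : List (String × List String)) (word c : String) :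
    pvM (kv :: l) word c
      = (if PySem.Str.startswith kv.1 c && kv.2.contains word then 1 else 0) + pvM l word c := by
  simp only [pvM, List.filter_cons]
  split_ifs <;> simp <;> omega

-- keys of the initial comprehension dict
theorem keys_init (chapters : List String) :
    (chapters.foldl (fun d i => d.insert i 0) (PySem.Dict.empty : PySem.Dict String Int)).keys
      = PySem.Set.ofList chapters := by
  rw [PySem.Dict.keys_foldl_insert]
  simp [PySem.Set.update_nil_left]

-- every chapter starts at 0
theorem getD_foldl_insert_zero (chapters : List String) (d : PySem.Dict String Int) (c : String)
    (h : d.getD c 0 = 0) :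
    (chapters.foldl (fun d i => d.insert i 0) d).getD c 0 = 0 := by
  induction chapters generalizing d with
  | nil => exact h
  | cons a l ih =>
      simp only [List.foldl_cons]
      exact ih _ (by rw [PySem.Dict.getD_insert]; split_ifs <;> simp [h])

-- the inner data loop leaves the keys alone (the modified key is already present)
theorem keys_inner (data : List (String × List String)) (word chapter : String)
    (d : PySem.Dict String Int) (h : d.contains chapter = true) :
    (pvInner data word chapter d).keys = d.keys := by
  induction data generalizing d with
  | nil => rfl
  | cons kv l ih =>
      simp only [pvInner, List.foldl_cons] at *
      split_ifs with h1 h2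
      · rw [ih _ (by simp [PySem.Dict.contains_modify, h])]
        rw [PySem.Dict.keys_modify, PySem.Dict.keys_insert_of_contains _ _ h]
      · exact ih _ h
      · exact ih _ h

theorem getD_inner (data : List (String × List String)) (word chapter : String)
    (d : PySem.Dict String Int) (x : String) :
    (pvInner data word chapter d).getD x 0
      = d.getD x 0 + (if x = chapter then pvM data word chapter else 0) := by
  induction data generalizing d with
  | nil => simp [pvInner, pvM]
  | cons kv l ih =>
      simp only [pvInner, List.foldl_cons] at *
      rw [pvM_cons]
      split_ifs with h1 h2 hx hx hx <;>
        simp_all [PySem.Dict.getD_modify, h1] <;> omega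

-- the outer chapter loop: keys preserved, value at x grows by count(x) * m(x)
theorem keys_outer (data : List (String × List String)) (word : String)
    (cl : List String) (d : PySem.Dict String Int) (h : ∀ c ∈ cl, d.contains c = true) :
    (cl.foldl (fun d chapter => pvInner data word chapter d) d).keys = d.keys := by
  induction cl generalizing d with
  | nil => rfl
  | cons a l ih =>
      simp only [List.foldl_cons]
      have hk : (pvInner data word a d).keys = d.keys :=
        keys_inner data word a d (h a (by simp))
      have hc : ∀ c ∈ l, (pvInner data word a d).contains c = true := by
        intro c hcmem
        rw [PySem.Dict.contains_eq_decide_mem_keys, hk,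
          ← PySem.Dict.contains_eq_decide_mem_keys]
        exact h c (by simp [hcmem])
      rw [ih _ hc, hk]

theorem getD_outer (data : List (String × List String)) (word : String)
    (cl : List String) (d : PySem.Dict String Int) (x : String) :
    (cl.foldl (fun d chapter => pvInner data word chapter d) d).getD x 0
      = d.getD x 0 + (cl.count x : Int) * pvM data word x := by
  induction cl generalizing d with
  | nil => simp
  | cons a l ih =>
      simp only [List.foldl_cons]
      rw [ih, getD_inner, List.count_cons]
      by_cases hx : x = a
      · subst hx; simp; push_cast; ring
      · simp [hx, (Ne.symm hx : a ≠ x)]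

-- the summing generator of A counts the positive values
theorem foldl_count_pos (vs : List Int) (acc : Int) :
    vs.foldl (fun acc i => if i > 0 then acc + 1 else acc) acc
      = acc + (vs.countP (fun i => decide (i > 0)) : Int) := by
  induction vs generalizing acc with
  | nil => simp
  | cons v l ih =>
      simp only [List.foldl_cons, List.countP_cons]
      by_cases h : v > 0
      · simp [h, ih]; ring
      · simp [h, ih]

-- positivity of the accumulated value ↔ some collected key starts with the chapter
theorem pos_iff_any (data : List (String × List String)) (word c : String) (n : Nat)
    (hn : 0 < n) :
    decide ((n : Int) * pvM data word c > 0)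
      = ((data.filter (fun kv => kv.2.contains word)).map (·.1)).any
          (fun k => PySem.Str.startswith k c) := by
  have hm : (0 : Int) ≤ pvM data word c := by simp [pvM]
  have h1 : ((n : Int) * pvM data word c > 0) ↔ 0 < pvM data word c := by
    constructor
    · intro h
      rcases lt_or_eq_of_le hm with h' | h'
      · exact h'
      · rw [← h'] at h; simp at h
    · intro h
      have hn' : (0 : Int) < (n : Int) := by exact_mod_cast hn
      exact mul_pos hn' h
  have h2 : (0 < pvM data word c) ↔
      ∃ kv ∈ data, PySem.Str.startswith kv.1 c = true ∧ kv.2.contains word = true := by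
    simp [pvM, Int.natCast_pos, List.length_pos_iff_exists_mem, List.mem_filter,
      Bool.and_eq_true]
  apply Bool.eq_iff_iff.mpr
  simp only [decide_eq_true_eq, List.any_eq_true, List.mem_map, List.mem_filter]
  rw [h1, h2]
  constructor
  · rintro ⟨kv, hkv, hs, hw⟩
    exact ⟨kv.1, ⟨kv, ⟨hkv, hw⟩, rfl⟩, hs⟩
  · rintro ⟨x, ⟨kv, ⟨hkv, hw⟩, rfl⟩, hs⟩
    exact ⟨kv, hkv, hs, hw⟩

-- ===== VERDICT (by name: the statement is the Claim_ definition above) =====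
theorem unique_count_spec : Claim_equal_unique_count := by
  intro data chapters word _
  unfold Spec_unique_count unique_count unique_count_alt
  show ((chapters.foldl (fun d chapter => pvInner data word chapter d)
      (chapters.foldl (fun d i => d.insert i 0) PySem.Dict.empty)).values.foldl
        (fun acc i => if i > 0 then acc + 1 else acc) 0) = _
  set d0 : PySem.Dict String Int :=
    chapters.foldl (fun d i => d.insert i 0) PySem.Dict.empty with hd0
  have hkeys0 : d0.keys = PySem.Set.ofList chapters := keys_init chapters
  have hc0 : ∀ c ∈ chapters, d0.contains c = true := by
    intro c hc
    rw [PySem.Dict.contains_eq_decide_mem_keys, hkeys0]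
    simp [PySem.Set.mem_ofList, hc]
  set F := chapters.foldl (fun d chapter => pvInner data word chapter d) d0 with hF
  have hkeys : F.keys = PySem.Set.ofList chapters := by
    rw [hF, keys_outer data word chapters d0 hc0, hkeys0]
  have hnd : F.keys.Nodup := by rw [hkeys]; exact PySem.Set.nodup_ofList chapters
  have hval : ∀ c, F.getD c 0 = (chapters.count c : Int) * pvM data word c := by
    intro c
    rw [hF, getD_outer, hd0, getD_foldl_insert_zero _ _ _ (by simp), zero_add]
  rw [PySem.Dict.values_eq_map_keys F hnd 0, foldl_count_pos, zero_add, hkeys,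
    List.countP_map]
  show (List.countP ((fun i => decide (i > 0)) ∘ fun k => F.getD k 0)
      (PySem.Set.ofList chapters) : Int)
    = ((List.filter
        (fun c => ((data.filter (fun kv => kv.2.contains word)).map (·.1)).any
          (fun k => PySem.Str.startswith k c)) (PySem.Set.ofList chapters)).length : Int)
  rw [← List.countP_eq_length_filter]
  congr 1
  apply List.countP_congr
  intro c hc
  have hcc : 0 < chapters.count c := by
    rw [List.count_pos_iff]
    exact (PySem.Set.mem_ofList chapters c).mp hc
  simp only [Function.comp_apply, hval c]
  rw [pos_iff_any data word c _ hcc]
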